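-- pv_equiv track=rewrite | github.com/TheNitromeFan/baekjoon | 12906.py | bfs
-- ===== SOURCE A (Python) =====
-- import collections
--
-- def ending_sequence(a, b, c):
--     return all(s == 'A' for s in a) and all(s == 'B' for s in b) and all(s == 'C' for s in c)
--
-- def bfs(sa, sb, sc):
--     dist = {}
--     q = collections.deque()
--     dist[(sa, sb, sc)] = 0
--     q.append((sa, sb, sc))
--     while q:
--         a, b, c = q.popleft()
--         if ending_sequence(a, b, c):
--             return dist[(a, b, c)]
--         if a:
--             na, nb, nc = a[:-1], b + a[-1], c
--             if (na, nb, nc) not in dist: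
--                 dist[(na, nb, nc)] = dist[(a, b, c)] + 1
--                 q.append((na, nb, nc))
--             na, nb, nc = a[:-1], b, c + a[-1]
--             if (na, nb, nc) not in dist:
--                 dist[(na, nb, nc)] = dist[(a, b, c)] + 1
--                 q.append((na, nb, nc))
--         if b:
--             na, nb, nc = a + b[-1], b[:-1], c
--             if (na, nb, nc) not in dist:
--                 dist[(na, nb, nc)] = dist[(a, b, c)] + 1
--                 q.append((na, nb, nc))
--             na, nb, nc = a, b[:-1], c + b[-1]
--             if (na, nb, nc) not in dist:
--                 dist[(na, nb, nc)] = dist[(a, b, c)] + 1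
--                 q.append((na, nb, nc))
--         if c:
--             na, nb, nc = a + c[-1], b, c[:-1]
--             if (na, nb, nc) not in dist:
--                 dist[(na, nb, nc)] = dist[(a, b, c)] + 1
--                 q.append((na, nb, nc))
--             na, nb, nc = a, b + c[-1], c[:-1]
--             if (na, nb, nc) not in dist:
--                 dist[(na, nb, nc)] = dist[(a, b, c)] + 1
--                 q.append((na, nb, nc))
-- ===== SOURCE B (Python) =====
-- def bfs(sa, sb, sc):
--     letters = sa + sb + sc
--     # A sorted end state must use exactly the letters present; if any letter is
--     # not one of A/B/C no end state exists at all.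
--     if any(ch not in 'ABC' for ch in letters):
--         return None
--     # The unique reachable end state, determined by the letter counts.
--     goal = ('A' * letters.count('A'), 'B' * letters.count('B'), 'C' * letters.count('C'))
--     start = (sa, sb, sc)
--
--     def moves(state):
--         # Each move pops the top of one stack onto another; this move set is its
--         # own reverse (undoing "pop x onto y" is "pop y onto x"), so searching
--         # backward from the goal measures the same distances.
--         a, b, c = state
--         out = []
--         if a:
--             out += [(a[:-1], b + a[-1], c), (a[:-1], b, c + a[-1])]
--         if b:
--             out += [(a + b[-1], b[:-1], c), (a, b[:-1], c + b[-1])]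
--         if c:
--             out += [(a + c[-1], b, c[:-1]), (a, b + c[-1], c[:-1])]
--         return out
--
--     # Backward breadth-first search from the goal, by levels, until the start
--     # state is met; its level is the number of moves.
--     visited = {goal}
--     frontier = [goal]
--     depth = 0
--     while frontier:
--         if start in frontier:
--             return depth
--         nxt = []
--         for s in frontier:
--             for t in moves(s):
--                 if t not in visited:
--                     visited.add(t)
--                     nxt.append(t)
--         frontier = nxt
--         depth += 1
--     return None
-- ===== Notes on version B (the rewrite author's own statement) =====
-- stated objective: alternative
-- what changed: Instead of A's forward deque-and-distance-dict BFS over all states, B checks that the letters are only A/B/C, synthesizes the unique sorted end state from the letter counts, and runs a backward level BFS from that end state until it meets the start state (the six moves form their own reverse relation), returning the level; infeasible letter multisets return None immediately.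
import Mathlib
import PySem

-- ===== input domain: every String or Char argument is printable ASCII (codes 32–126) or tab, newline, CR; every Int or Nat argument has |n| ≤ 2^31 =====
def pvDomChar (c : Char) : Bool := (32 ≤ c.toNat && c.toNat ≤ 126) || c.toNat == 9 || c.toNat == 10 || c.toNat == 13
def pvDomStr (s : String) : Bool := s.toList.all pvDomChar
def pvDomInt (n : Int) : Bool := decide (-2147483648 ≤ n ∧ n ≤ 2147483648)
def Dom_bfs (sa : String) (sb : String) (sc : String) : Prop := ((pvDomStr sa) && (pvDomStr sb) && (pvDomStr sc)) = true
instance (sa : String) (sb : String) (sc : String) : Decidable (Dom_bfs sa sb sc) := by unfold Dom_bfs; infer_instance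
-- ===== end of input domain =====

-- B replaces A's forward deque-and-dict BFS by: a letter-count feasibility check, synthesis of
-- the unique sorted end state from the counts, and a backward level BFS from that end state
-- until the start state is met (the move set is its own reverse). Same return value.
-- Python's dict/set are hash tables and only membership/lookup is ever observed here, so they
-- are ported as Std.HashMap / Std.HashSet. Both loops carry a fuel parameter (a port
-- artifact): fuel pvFuel is proved sufficient, so the exhaustion branch is unreachable.

-- A state (a, b, c): the three stacks, as lists of characters.
abbrev PvSt := List Char × List Char × List Char

-- ===== PORT A =====

-- all(s == 'A' for s in a) and all(s == 'B' for s in b) and all(s == 'C' for s in c)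
def endingSequence (a : List Char) (b : List Char) (c : List Char) : Bool :=
  (a.all (fun s => s == 'A')) && (b.all (fun s => s == 'B')) && (c.all (fun s => s == 'C'))

-- 'if (na, nb, nc) not in dist: dist[(na, nb, nc)] = dist[(a, b, c)] + 1; q.append((na, nb, nc))'
def pvAddA (dcur : Int) (p : Std.HashMap PvSt Int × List PvSt) (st : PvSt) :
    Std.HashMap PvSt Int × List PvSt :=
  if !(p.1.contains st) then (p.1.insert st (dcur + 1), p.2 ++ [st]) else p

-- the loop body after the goal test: the three 'if a:/if b:/if c:' blocks (six conditional inserts)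
-- a[:-1] is slice, a[-1] is pyGetD at -1 (guarded by a ≠ [], so no IndexError; default arbitrary)
def pvStepA (dcur : Int) (p : Std.HashMap PvSt Int × List PvSt) (st : PvSt) :
    Std.HashMap PvSt Int × List PvSt :=
  let (a, b, c) := st
  let p :=
    if a != [] then
      let p := pvAddA dcur p (PySem.List.slice a none (some (-1)), b ++ [PySem.List.pyGetD a (-1) 'A'], c)
      pvAddA dcur p (PySem.List.slice a none (some (-1)), b, c ++ [PySem.List.pyGetD a (-1) 'A'])
    else p
  let p :=
    if b != [] then
      let p := pvAddA dcur p (a ++ [PySem.List.pyGetD b (-1) 'A'], PySem.List.slice b none (some (-1)), c)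
      pvAddA dcur p (a, PySem.List.slice b none (some (-1)), c ++ [PySem.List.pyGetD b (-1) 'A'])
    else p
  if c != [] then
    let p := pvAddA dcur p (a ++ [PySem.List.pyGetD c (-1) 'A'], b, PySem.List.slice c none (some (-1)))
    pvAddA dcur p (a, b ++ [PySem.List.pyGetD c (-1) 'A'], PySem.List.slice c none (some (-1)))
  else p

-- 'while q:' — fuel-bounded; none = fuel ran out (proved unreachable at pvFuel)
def bfsLoop : Nat → Std.HashMap PvSt Int → List PvSt → Option (Option Int)
  | 0, _, _ => none
  | fuel + 1, dist, q =>
    match q with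
    | [] => some none
    | (a, b, c) :: qt =>
      if endingSequence a b c then some (some (dist.getD (a, b, c) 0))
      else
        let p := pvStepA (dist.getD (a, b, c) 0) (dist, qt) (a, b, c)
        bfsLoop fuel p.1 p.2

-- fuel: strictly more than the number of possible states (all chars are ASCII ≤ 126 on Dom)
def pvFuel (sa : String) (sb : String) (sc : String) : Nat :=
  128 ^ (sa.toList.length + sb.toList.length + sc.toList.length + 2) + 2

def bfs (sa : String) (sb : String) (sc : String) : Option Int :=
  let s0 : PvSt := (sa.toList, sb.toList, sc.toList)
  match bfsLoop (pvFuel sa sb sc) ((∅ : Std.HashMap PvSt Int).insert s0 0) [s0] with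
  | some r => r
  | none => none

-- ===== PORT B =====

-- moves(state): the list of (up to six) successor states, in order
def pvMoves (st : PvSt) : List PvSt :=
  let (a, b, c) := st
  (if a != [] then
      [(PySem.List.slice a none (some (-1)), b ++ [PySem.List.pyGetD a (-1) 'A'], c),
       (PySem.List.slice a none (some (-1)), b, c ++ [PySem.List.pyGetD a (-1) 'A'])]
    else []) ++
  (if b != [] then
      [(a ++ [PySem.List.pyGetD b (-1) 'A'], PySem.List.slice b none (some (-1)), c),
       (a, PySem.List.slice b none (some (-1)), c ++ [PySem.List.pyGetD b (-1) 'A'])]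
    else []) ++
  (if c != [] then
      [(a ++ [PySem.List.pyGetD c (-1) 'A'], b, PySem.List.slice c none (some (-1))),
       (a, b ++ [PySem.List.pyGetD c (-1) 'A'], PySem.List.slice c none (some (-1)))]
    else [])

-- 'if t not in visited: visited.add(t); nxt.append(t)'
def pvAddB (p : Std.HashSet PvSt × List PvSt) (t : PvSt) : Std.HashSet PvSt × List PvSt :=
  if !(p.1.contains t) then (p.1.insert t, p.2 ++ [t]) else p

-- 'for t in moves(s): …'
def pvStepB (p : Std.HashSet PvSt × List PvSt) (s : PvSt) : Std.HashSet PvSt × List PvSt :=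
  (pvMoves s).foldl pvAddB p

-- 'while frontier:' level loop, parametric in the membership test done on the frontier
-- ('start in frontier' in Source B); fuel-bounded, none = fuel ran out (proved unreachable at pvFuel)
def pvLevelLoop (P : PvSt → Bool) : Nat → Std.HashSet PvSt → List PvSt → Int → Option (Option Int)
  | 0, _, _, _ => none
  | fuel + 1, visited, frontier, depth =>
    if frontier.isEmpty then some none
    else if frontier.any P then some (some depth)
    else
      let p := frontier.foldl pvStepB (visited, [])
      pvLevelLoop P fuel p.1 p.2 (depth + 1)

def bfs_alt (sa : String) (sb : String) (sc : String) : Option Int :=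
  -- letters = sa + sb + sc; any(ch not in 'ABC' for ch in letters)
  -- (single-character 'in' on the literal 'ABC' is exactly membership in ['A','B','C'])
  let letters := sa.toList ++ sb.toList ++ sc.toList
  if letters.any (fun ch => !(['A', 'B', 'C'].contains ch)) then none
  else
    -- goal = ('A' * letters.count('A'), 'B' * letters.count('B'), 'C' * letters.count('C'))
    let goal : PvSt := (List.replicate (letters.count 'A') 'A',
                        List.replicate (letters.count 'B') 'B',
                        List.replicate (letters.count 'C') 'C')
    let start : PvSt := (sa.toList, sb.toList, sc.toList)
    match pvLevelLoop (fun t => t == start) (pvFuel sa sb sc)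
        ((∅ : Std.HashSet PvSt).insert goal) [goal] 0 with
    | some r => r
    | none => none

-- ===== PRECONDITION & SPEC =====
def Spec_bfs (sa : String) (sb : String) (sc : String) (out : Option Int) : Prop := out = bfs_alt sa sb sc
instance (sa : String) (sb : String) (sc : String) (out : Option Int) : Decidable (Spec_bfs sa sb sc out) := by unfold Spec_bfs; infer_instance

-- ===== CLAIM (what is proved, stated in full; the proofs are below) =====
def Claim_equal_bfs : Prop := ∀ (sa : String) (sb : String) (sc : String), Dom_bfs sa sb sc → Spec_bfs sa sb sc (bfs sa sb sc)

-- ===== LEMMAS AND PROOFS =====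

-- A's goal test, as a predicate on states
def pvOk (st : PvSt) : Bool :=
  (st.1.all (fun ch => ch == 'A')) && (st.2.1.all (fun ch => ch == 'B')) && (st.2.2.all (fun ch => ch == 'C'))

theorem pvOk_eq (a b c : List Char) : pvOk (a, b, c) = endingSequence a b c := rfl

-- pvStepA is the fold of pvAddA over the same candidate list that pvMoves builds
theorem pvStepA_eq_foldl (d : Int) (p : Std.HashMap PvSt Int × List PvSt) (s : PvSt) :
    pvStepA d p s = (pvMoves s).foldl (pvAddA d) p := by
  rcases s with ⟨a, b, c⟩
  simp only [pvStepA, pvMoves]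
  by_cases ha : a = [] <;> by_cases hb : b = [] <;> by_cases hc : c = [] <;>
    simp [ha, hb, hc]

-- core simulation of one run of conditional inserts: A's dict/queue vs B's set/next-list
theorem pvAddSim (d : Int) :
    ∀ (ts : List PvSt) (dist : Std.HashMap PvSt Int),
    ∃ (dist' : Std.HashMap PvSt Int) (new : List PvSt),
      (∀ P : List PvSt, ts.foldl (pvAddA d) (dist, P) = (dist', P ++ new)) ∧
      (∀ (vis : Std.HashSet PvSt) (nxt : List PvSt),
        (∀ t, vis.contains t = dist.contains t) →
        ∃ vis', ts.foldl pvAddB (vis, nxt) = (vis', nxt ++ new) ∧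
          (∀ t, vis'.contains t = dist'.contains t) ∧ vis'.size = vis.size + new.length) ∧
      dist'.size = dist.size + new.length ∧
      (∀ t, dist'.contains t = true ↔ (dist.contains t = true ∨ t ∈ new)) ∧
      (∀ (t : PvSt) (v : Int), dist[t]? = some v → dist'[t]? = some v) ∧
      (∀ t ∈ new, dist'[t]? = some (d + 1)) ∧
      (∀ t ∈ new, t ∈ ts) := by
  intro ts
  induction ts with
  | nil =>
    intro dist
    refine ⟨dist, [], by simp, ?_, by simp, by simp, fun t v h => h, by simp, by simp⟩
    intro vis nxt hrel
    exact ⟨vis, by simp, hrel, by simp⟩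
  | cons t ts ih =>
    intro dist
    by_cases hc : dist.contains t = true
    · obtain ⟨dist', new, hA, hB, hsz, hct, hpres, hnew, hmem⟩ := ih dist
      refine ⟨dist', new, ?_, ?_, hsz, hct, hpres, hnew,
        fun x hx => List.mem_cons_of_mem _ (hmem x hx)⟩
      · intro P; simpa [pvAddA, hc] using hA P
      · intro vis nxt hrel
        obtain ⟨vis', he, hrel', hvsz⟩ := hB vis nxt hrel
        exact ⟨vis', by simpa [pvAddB, hrel t, hc] using he, hrel', hvsz⟩
    · have hc' : dist.contains t = false := by simpa using hc
      obtain ⟨dist', new, hA, hB, hsz, hct, hpres, hnew, hmem⟩ := ih (dist.insert t (d + 1))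
      have htm : t ∉ dist := fun hm => by
        rw [Std.HashMap.mem_iff_contains, hc'] at hm; exact absurd hm (by simp)
      refine ⟨dist', t :: new, ?_, ?_, ?_, ?_, ?_, ?_, ?_⟩
      · intro P; simpa [pvAddA, hc', List.append_assoc] using hA (P ++ [t])
      · intro vis nxt hrel
        have hvc : vis.contains t = false := by rw [hrel t]; exact hc'
        have hvm : t ∉ vis := fun hm => by
          rw [Std.HashSet.mem_iff_contains, hvc] at hm; exact absurd hm (by simp)
        have hrel1 : ∀ x, (vis.insert t).contains x = (dist.insert t (d + 1)).contains x := by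
          intro x; rw [Std.HashSet.contains_insert, Std.HashMap.contains_insert, hrel x]
        obtain ⟨vis', he, hrel', hvsz⟩ := hB (vis.insert t) (nxt ++ [t]) hrel1
        refine ⟨vis', ?_, hrel', ?_⟩
        · simpa [pvAddB, hvc, List.append_assoc] using he
        · rw [hvsz, Std.HashSet.size_insert, if_neg hvm]; simp; omega
      · rw [hsz, Std.HashMap.size_insert, if_neg htm]; simp; omega
      · intro x
        rw [hct x, Std.HashMap.contains_insert]
        simp only [Bool.or_eq_true, beq_iff_eq, List.mem_cons]
        tauto
      · intro x v hv
        have hne : (t == x) = false := by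
          apply beq_eq_false_iff_ne.mpr
          intro he
          subst he
          rw [show dist[t]? = none from by
            have := Std.HashMap.contains_eq_isSome_getElem? (m := dist) (a := t)
            rw [hc'] at this
            exact Option.not_isSome_iff_eq_none.mp (by rw [← this]; simp)] at hv
          simp at hv
        apply hpres
        rw [Std.HashMap.getElem?_insert, hne]
        simpa using hv
      · intro x hx
        rcases List.mem_cons.mp hx with rfl | hm
        · exact hpres x (d + 1) Std.HashMap.getElem?_insert_self
        · exact hnew x hm
      · intro x hx
        rcases List.mem_cons.mp hx with rfl | hm
        · exact List.mem_cons_self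
        · exact List.mem_cons_of_mem _ (hmem x hm)

-- B-side-only shape of one run of conditional adds, with an exact description of the added list
theorem pvAddBShape :
    ∀ (ts : List PvSt) (vis : Std.HashSet PvSt) (nxt : List PvSt),
    ∃ vis' new, ts.foldl pvAddB (vis, nxt) = (vis', nxt ++ new) ∧
      (∀ t, vis'.contains t = true ↔ (vis.contains t = true ∨ t ∈ new)) ∧
      vis'.size = vis.size + new.length ∧
      (∀ t, t ∈ new ↔ (t ∈ ts ∧ vis.contains t = false)) := by
  intro ts
  induction ts with
  | nil =>
    intro vis nxt
    exact ⟨vis, [], by simp, by simp, by simp, by simp⟩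
  | cons t ts ih =>
    intro vis nxt
    by_cases hc : vis.contains t = true
    · obtain ⟨vis', new, he, hct, hsz, hmem⟩ := ih vis nxt
      refine ⟨vis', new, by simpa [pvAddB, hc] using he, hct, hsz, ?_⟩
      intro x
      rw [hmem x]
      constructor
      · rintro ⟨hx, hv⟩; exact ⟨List.mem_cons_of_mem _ hx, hv⟩
      · rintro ⟨hx, hv⟩
        rcases List.mem_cons.mp hx with rfl | hm
        · rw [hc] at hv; cases hv
        · exact ⟨hm, hv⟩
    · have hc' : vis.contains t = false := by simpa using hc
      have hvm : t ∉ vis := fun hm => by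
        rw [Std.HashSet.mem_iff_contains, hc'] at hm; exact absurd hm (by simp)
      obtain ⟨vis', new, he, hct, hsz, hmem⟩ := ih (vis.insert t) (nxt ++ [t])
      refine ⟨vis', t :: new, ?_, ?_, ?_, ?_⟩
      · simpa [pvAddB, hc', List.append_assoc] using he
      · intro x
        rw [hct x, Std.HashSet.contains_insert]
        simp only [Bool.or_eq_true, beq_iff_eq, List.mem_cons]
        tauto
      · rw [hsz, Std.HashSet.size_insert, if_neg hvm]; simp; omega
      · intro x
        constructor
        · intro hx
          rcases List.mem_cons.mp hx with rfl | hm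
          · exact ⟨List.mem_cons_self, hc'⟩
          · obtain ⟨hts, hv⟩ := (hmem x).mp hm
            rw [Std.HashSet.contains_insert] at hv
            refine ⟨List.mem_cons_of_mem _ hts, ?_⟩
            rcases Bool.or_eq_false_iff.mp hv with ⟨_, h2⟩
            exact h2
        · rintro ⟨hx, hv⟩
          by_cases hxt : x = t
          · subst hxt; exact List.mem_cons_self
          · rcases List.mem_cons.mp hx with rfl | hm
            · exact absurd rfl hxt
            · apply List.mem_cons_of_mem
              apply (hmem x).mpr
              refine ⟨hm, ?_⟩
              rw [Std.HashSet.contains_insert, hv]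
              simpa using fun he => hxt he.symm

theorem pvFrontBShape :
    ∀ (F : List PvSt) (vis : Std.HashSet PvSt) (nxt : List PvSt),
    ∃ vis' new, F.foldl pvStepB (vis, nxt) = (vis', nxt ++ new) ∧
      (∀ t, vis'.contains t = true ↔ (vis.contains t = true ∨ t ∈ new)) ∧
      vis'.size = vis.size + new.length ∧
      (∀ t, t ∈ new ↔ ((∃ s ∈ F, t ∈ pvMoves s) ∧ vis.contains t = false)) := by
  intro F
  induction F with
  | nil =>
    intro vis nxt
    exact ⟨vis, [], by simp, by simp, by simp, by simp⟩
  | cons s F ih =>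
    intro vis nxt
    obtain ⟨vis1, new1, he1, hct1, hsz1, hmem1⟩ := pvAddBShape (pvMoves s) vis nxt
    obtain ⟨vis2, new2, he2, hct2, hsz2, hmem2⟩ := ih vis1 (nxt ++ new1)
    refine ⟨vis2, new1 ++ new2, ?_, ?_, ?_, ?_⟩
    · rw [List.foldl_cons, show pvStepB (vis, nxt) s = (vis1, nxt ++ new1) from he1, he2,
        List.append_assoc]
    · intro x
      rw [hct2 x, hct1 x]
      simp only [List.mem_append]
      tauto
    · rw [hsz2, hsz1]; simp; omega
    · intro x
      constructor
      · intro hx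
        rcases List.mem_append.mp hx with h1 | h2
        · obtain ⟨hm, hv⟩ := (hmem1 x).mp h1
          exact ⟨⟨s, List.mem_cons_self, hm⟩, hv⟩
        · obtain ⟨⟨s', hs', hm⟩, hv1⟩ := (hmem2 x).mp h2
          have hv : vis.contains x = false := by
            rcases Bool.eq_false_iff.mp hv1 with _
            by_contra hcon
            have : vis1.contains x = true := (hct1 x).mpr (Or.inl (by simpa using hcon))
            rw [this] at hv1; cases hv1
          exact ⟨⟨s', List.mem_cons_of_mem _ hs', hm⟩, hv⟩
      · rintro ⟨⟨s', hs', hm⟩, hv⟩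
        by_cases h1 : x ∈ new1
        · exact List.mem_append.mpr (Or.inl h1)
        · have hv1 : vis1.contains x = false := by
            rw [Bool.eq_false_iff]
            intro hcon
            rcases (hct1 x).mp hcon with h | h
            · rw [h] at hv; cases hv
            · exact h1 h
          rcases List.mem_cons.mp hs' with rfl | hsF
          · exact absurd ((hmem1 x).mpr ⟨hm, hv⟩) h1
          · exact List.mem_append.mpr (Or.inr ((hmem2 x).mpr ⟨⟨s', hsF, hm⟩, hv1⟩))

-- simulation of one whole level: A pops every frontier state, B folds pvStepB over it
theorem pvFrontSim (d : Int) :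
    ∀ (F : List PvSt) (dist : Std.HashMap PvSt Int),
    (∀ s ∈ F, dist[s]? = some d) →
    ∃ (dist' : Std.HashMap PvSt Int) (new : List PvSt),
      (∀ P : List PvSt,
        F.foldl (fun p s => pvStepA (p.1.getD s 0) p s) (dist, P) = (dist', P ++ new)) ∧
      (∀ (vis : Std.HashSet PvSt) (nxt : List PvSt),
        (∀ t, vis.contains t = dist.contains t) →
        ∃ vis', F.foldl pvStepB (vis, nxt) = (vis', nxt ++ new) ∧
          (∀ t, vis'.contains t = dist'.contains t)) ∧
      (∀ (t : PvSt) (v : Int), dist[t]? = some v → dist'[t]? = some v) ∧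
      (∀ t ∈ new, dist'[t]? = some (d + 1)) := by
  intro F
  induction F with
  | nil =>
    intro dist _
    refine ⟨dist, [], by simp, ?_, fun t v h => h, by simp⟩
    intro vis nxt hrel
    exact ⟨vis, by simp, hrel⟩
  | cons s F ih =>
    intro dist hF
    have hs : dist[s]? = some d := hF s List.mem_cons_self
    have hsD : dist.getD s 0 = d := by rw [Std.HashMap.getD_eq_getD_getElem?, hs]; rfl
    obtain ⟨dist1, new1, hA1, hB1, _, _, hpres1, hnew1, _⟩ := pvAddSim d (pvMoves s) dist
    obtain ⟨dist2, new2, hA2, hB2, hpres2, hnew2⟩ :=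
      ih dist1 (fun s' hs' => hpres1 s' d (hF s' (List.mem_cons_of_mem _ hs')))
    refine ⟨dist2, new1 ++ new2, ?_, ?_, ?_, ?_⟩
    · intro P
      have e1 : pvStepA ((dist, P).1.getD s 0) (dist, P) s = (dist1, P ++ new1) := by
        rw [show (dist, P).1 = dist from rfl, hsD, pvStepA_eq_foldl]; exact hA1 P
      rw [List.foldl_cons, e1, hA2 (P ++ new1), List.append_assoc]
    · intro vis nxt hrel
      obtain ⟨vis1, he1, hrel1, _⟩ := hB1 vis nxt hrel
      obtain ⟨vis2, he2, hrel2⟩ := hB2 vis1 (nxt ++ new1) hrel1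
      refine ⟨vis2, ?_, hrel2⟩
      rw [List.foldl_cons, show pvStepB (vis, nxt) s = (vis1, nxt ++ new1) from he1, he2,
        List.append_assoc]
    · exact fun t v hv => hpres2 t v (hpres1 t v hv)
    · intro t ht
      rcases List.mem_append.mp ht with h1 | h2
      · exact hpres2 t (d + 1) (hnew1 t h1)
      · exact hnew2 t h2

-- A's loop consumes a goal-free level F exactly like the fold
theorem pvLevelRun (d : Int) :
    ∀ (F : List PvSt) (dist : Std.HashMap PvSt Int) (P : List PvSt) (f : Nat),
    (∀ s ∈ F, dist[s]? = some d) → (∀ s ∈ F, pvOk s = false) →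
    bfsLoop (F.length + f) dist (F ++ P) =
      bfsLoop f (F.foldl (fun p s => pvStepA (p.1.getD s 0) p s) (dist, P)).1
               (F.foldl (fun p s => pvStepA (p.1.getD s 0) p s) (dist, P)).2 := by
  intro F
  induction F with
  | nil => intro dist P f _ _; simp
  | cons s F ih =>
    intro dist P f hF hok
    rcases s with ⟨a, b, c⟩
    have hs : dist[((a, b, c) : PvSt)]? = some d := hF _ List.mem_cons_self
    have hsD : dist.getD (a, b, c) 0 = d := by rw [Std.HashMap.getD_eq_getD_getElem?, hs]; rfl
    have hend : endingSequence a b c = false := by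
      have := hok _ List.mem_cons_self; rwa [pvOk_eq] at this
    obtain ⟨dist1, new1, hA1, _, _, _, hpres1, _, _⟩ := pvAddSim d (pvMoves (a, b, c)) dist
    have e1 : ∀ Q, pvStepA (dist.getD (a, b, c) 0) (dist, Q) (a, b, c) = (dist1, Q ++ new1) := by
      intro Q; rw [hsD, pvStepA_eq_foldl]; exact hA1 Q
    have hlen : ((a, b, c) :: F).length + f = (F.length + f) + 1 := by simp; omega
    rw [hlen, List.cons_append]
    have hstep : bfsLoop (F.length + f + 1) dist ((a, b, c) :: (F ++ P)) =
        bfsLoop (F.length + f) dist1 (F ++ (P ++ new1)) := by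
      simp only [bfsLoop, hend, Bool.false_eq_true, if_false]
      rw [e1 (F ++ P), List.append_assoc]
    rw [hstep, List.foldl_cons,
      show pvStepA ((dist, P).1.getD (a, b, c) 0) (dist, P) (a, b, c) = (dist1, P ++ new1) from e1 P]
    exact ih dist1 (P ++ new1) f
      (fun s' hs' => hpres1 s' d (hF s' (List.mem_cons_of_mem _ hs')))
      (fun s' hs' => hok s' (List.mem_cons_of_mem _ hs'))

-- if some frontier state is a goal, A's loop returns the common depth d
theorem pvFindGoal (d : Int) :
    ∀ (F : List PvSt) (dist : Std.HashMap PvSt Int) (P : List PvSt),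
    (∀ s ∈ F, dist[s]? = some d) → F.any pvOk = true →
    ∃ f, bfsLoop f dist (F ++ P) = some (some d) := by
  intro F
  induction F with
  | nil => intro dist P _ hany; simp at hany
  | cons s F ih =>
    intro dist P hF hany
    rcases s with ⟨a, b, c⟩
    have hs : dist[((a, b, c) : PvSt)]? = some d := hF _ List.mem_cons_self
    have hsD : dist.getD (a, b, c) 0 = d := by rw [Std.HashMap.getD_eq_getD_getElem?, hs]; rfl
    by_cases hok : pvOk (a, b, c) = true
    · refine ⟨1, ?_⟩
      have hend : endingSequence a b c = true := by rwa [pvOk_eq] at hok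
      simp only [List.cons_append, bfsLoop, hend, if_true, hsD]
    · have hend : endingSequence a b c = false := by
        rw [← pvOk_eq]; simpa using hok
      have hany' : F.any pvOk = true := by
        rcases List.any_eq_true.mp hany with ⟨x, hx, hpx⟩
        rcases List.mem_cons.mp hx with he | hm
        · subst he; exact absurd hpx hok
        · exact List.any_eq_true.mpr ⟨x, hm, hpx⟩
      obtain ⟨dist1, new1, hA1, _, _, _, hpres1, _, _⟩ := pvAddSim d (pvMoves (a, b, c)) dist
      obtain ⟨f2, hf2⟩ := ih dist1 (P ++ new1)
        (fun s' hs' => hpres1 s' d (hF s' (List.mem_cons_of_mem _ hs'))) hany'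
      refine ⟨f2 + 1, ?_⟩
      rw [List.cons_append]
      simp only [bfsLoop, hend, Bool.false_eq_true, if_false]
      rw [show pvStepA (dist.getD (a, b, c) 0) (dist, F ++ P) (a, b, c) = (dist1, (F ++ P) ++ new1) from by
        rw [hsD, pvStepA_eq_foldl]; exact hA1 (F ++ P), List.append_assoc]
      exact hf2

-- more fuel cannot change a returned result
theorem bfsLoop_mono : ∀ (f : Nat) (dist : Std.HashMap PvSt Int) (q : List PvSt) (r : Option Int),
    bfsLoop f dist q = some r → bfsLoop (f + 1) dist q = some r := by
  intro f
  induction f with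
  | zero => intro dist q r h; simp [bfsLoop] at h
  | succ n ih =>
    intro dist q r h
    match q with
    | [] => exact h
    | (a, b, c) :: qt =>
      by_cases hend : endingSequence a b c = true
      · simpa [bfsLoop, hend] using h
      · have hend' : endingSequence a b c = false := by simpa using hend
        simp only [bfsLoop, hend', Bool.false_eq_true, if_false] at h ⊢
        exact ih _ _ r h

theorem bfsLoop_mono_le (f f' : Nat) (dist : Std.HashMap PvSt Int) (q : List PvSt) (r : Option Int)
    (h : f ≤ f') (hr : bfsLoop f dist q = some r) : bfsLoop f' dist q = some r := by
  induction f' with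
  | zero =>
    have : f = 0 := by omega
    subst this; exact hr
  | succ n ih =>
    by_cases hf : f = n + 1
    · subst hf; exact hr
    · exact bfsLoop_mono n dist q r (ih (by omega))

theorem bfsLoop_uniq (f1 f2 : Nat) (dist : Std.HashMap PvSt Int) (q : List PvSt) (r1 r2 : Option Int)
    (h1 : bfsLoop f1 dist q = some r1) (h2 : bfsLoop f2 dist q = some r2) : r1 = r2 := by
  have e1 := bfsLoop_mono_le f1 (max f1 f2) dist q r1 (Nat.le_max_left _ _) h1
  have e2 := bfsLoop_mono_le f2 (max f1 f2) dist q r2 (Nat.le_max_right _ _) h2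
  rw [e1] at e2; exact Option.some_inj.mp e2

-- MAIN simulation: whatever the pvOk level loop returns, A's queue loop returns too
theorem pvMainSim :
    ∀ (fB : Nat) (dist : Std.HashMap PvSt Int) (F : List PvSt) (d : Int) (r : Option Int)
      (vis : Std.HashSet PvSt),
    (∀ s ∈ F, dist[s]? = some d) →
    (∀ t, vis.contains t = dist.contains t) →
    pvLevelLoop pvOk fB vis F d = some r →
    ∃ fA, bfsLoop fA dist F = some r := by
  intro fB
  induction fB with
  | zero => intro dist F d r vis _ _ h; simp [pvLevelLoop] at h
  | succ n ih =>
    intro dist F d r vis hF hrel h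
    simp only [pvLevelLoop] at h
    by_cases hemp : F.isEmpty = true
    · obtain rfl := List.isEmpty_iff.mp hemp
      simp at h
      exact ⟨1, by simp [bfsLoop, ← h]⟩
    · by_cases hany : F.any pvOk = true
      · simp only [hemp, hany, if_false, if_true, Bool.false_eq_true] at h
        obtain ⟨f, hf⟩ := pvFindGoal d F dist [] hF hany
        rw [List.append_nil] at hf
        rw [← h]
        exact ⟨f, hf⟩
      · have hany' : F.any pvOk = false := by simpa using hany
        have hok : ∀ s ∈ F, pvOk s = false := by
          intro s hs
          by_contra hcon
          exact hany ((List.any_eq_true).mpr ⟨s, hs, by simpa using hcon⟩)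
        simp only [hemp, hany', Bool.false_eq_true, if_false] at h
        obtain ⟨dist2, new, hA2, hB2, hpres2, hnew2⟩ := pvFrontSim d F dist hF
        obtain ⟨vis2, he2, hrel2⟩ := hB2 vis [] hrel
        rw [he2] at h
        simp only [List.nil_append] at h
        obtain ⟨fA, hfA⟩ := ih dist2 new (d + 1) r vis2 hnew2 hrel2 h
        refine ⟨F.length + fA, ?_⟩
        have hrun := pvLevelRun d F dist [] fA hF hok
        rw [List.append_nil] at hrun
        rw [hrun, hA2 [], List.nil_append]
        exact hfA

-- ===== finiteness: the state space on ASCII≤126 inputs has fewer than 128^(n+2) states =====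

def pvBounded (n : Nat) (st : PvSt) : Prop :=
  st.1.length + st.2.1.length + st.2.2.length = n ∧
  (∀ ch ∈ st.1, ch.toNat ≤ 126) ∧ (∀ ch ∈ st.2.1, ch.toNat ≤ 126) ∧ (∀ ch ∈ st.2.2, ch.toNat ≤ 126)

theorem pvMovesBounded (n : Nat) (s t : PvSt) (hs : pvBounded n s) (ht : t ∈ pvMoves s) :
    pvBounded n t := by
  obtain ⟨a, b, c⟩ := s
  obtain ⟨hlen, hA, hB, hC⟩ := hs
  simp only at hlen hA hB hC
  have hsing : ∀ (x y : List Char) (hx : x ≠ []), (∀ ch ∈ x, ch.toNat ≤ 126) →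
      (∀ ch ∈ y, ch.toNat ≤ 126) → ∀ ch ∈ y ++ [x.getLast hx], ch.toNat ≤ 126 := by
    intro x y hx hxb hyb ch hch
    rcases List.mem_append.mp hch with h | h
    · exact hyb ch h
    · rw [List.mem_singleton] at h; subst h; exact hxb _ (List.getLast_mem hx)
  have hdrop : ∀ (x : List Char), (∀ ch ∈ x, ch.toNat ≤ 126) →
      ∀ ch ∈ x.dropLast, ch.toNat ≤ 126 := by
    intro x hxb ch hch; exact hxb ch (List.dropLast_subset x hch)
  have M1 : ∀ (hx : a ≠ []), pvBounded n (a.dropLast, b ++ [a.getLast hx], c) := by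
    intro hx
    have := List.length_pos_of_ne_nil hx
    exact ⟨by simp [List.length_dropLast]; omega, hdrop a hA, hsing a b hx hA hB, hC⟩
  have M2 : ∀ (hx : a ≠ []), pvBounded n (a.dropLast, b, c ++ [a.getLast hx]) := by
    intro hx
    have := List.length_pos_of_ne_nil hx
    exact ⟨by simp [List.length_dropLast]; omega, hdrop a hA, hB, hsing a c hx hA hC⟩
  have M3 : ∀ (hx : b ≠ []), pvBounded n (a ++ [b.getLast hx], b.dropLast, c) := by
    intro hx
    have := List.length_pos_of_ne_nil hx
    exact ⟨by simp [List.length_dropLast]; omega, hsing b a hx hB hA, hdrop b hB, hC⟩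
  have M4 : ∀ (hx : b ≠ []), pvBounded n (a, b.dropLast, c ++ [b.getLast hx]) := by
    intro hx
    have := List.length_pos_of_ne_nil hx
    exact ⟨by simp [List.length_dropLast]; omega, hA, hdrop b hB, hsing b c hx hB hC⟩
  have M5 : ∀ (hx : c ≠ []), pvBounded n (a ++ [c.getLast hx], b, c.dropLast) := by
    intro hx
    have := List.length_pos_of_ne_nil hx
    exact ⟨by simp [List.length_dropLast]; omega, hsing c a hx hC hA, hB, hdrop c hC⟩
  have M6 : ∀ (hx : c ≠ []), pvBounded n (a, b ++ [c.getLast hx], c.dropLast) := by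
    intro hx
    have := List.length_pos_of_ne_nil hx
    exact ⟨by simp [List.length_dropLast]; omega, hA, hsing c b hx hC hB, hdrop c hC⟩
  simp only [pvMoves] at ht
  rcases List.mem_append.mp ht with hab | h3
  · rcases List.mem_append.mp hab with h1 | h2
    · split at h1
      · rename_i hcond
        have ha : a ≠ [] := by simpa using hcond
        simp only [List.mem_cons, List.not_mem_nil, or_false] at h1
        rw [PySem.List.slice_to_neg_one, PySem.List.pyGetD_neg_one a 'A' ha] at h1
        rcases h1 with rfl | rfl
        · exact M1 ha
        · exact M2 ha
      · simp at h1
    · split at h2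
      · rename_i hcond
        have hb : b ≠ [] := by simpa using hcond
        simp only [List.mem_cons, List.not_mem_nil, or_false] at h2
        rw [PySem.List.slice_to_neg_one, PySem.List.pyGetD_neg_one b 'A' hb] at h2
        rcases h2 with rfl | rfl
        · exact M3 hb
        · exact M4 hb
      · simp at h2
  · split at h3
    · rename_i hcond
      have hc : c ≠ [] := by simpa using hcond
      simp only [List.mem_cons, List.not_mem_nil, or_false] at h3
      rw [PySem.List.slice_to_neg_one, PySem.List.pyGetD_neg_one c 'A' hc] at h3
      rcases h3 with rfl | rfl
      · exact M5 hc
      · exact M6 hc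
    · simp at h3

def pvEncode : List Nat → Nat
  | [] => 0
  | d :: l => d + 128 * pvEncode l

def pvDigits (st : PvSt) : List Nat :=
  st.1.map Char.toNat ++ (127 :: (st.2.1.map Char.toNat ++ (127 :: st.2.2.map Char.toNat)))

theorem pvCharToNatInj (c d : Char) (h : c.toNat = d.toNat) : c = d := by
  apply Char.ext; exact UInt32.toNat_inj.mp h

theorem pvMapToNatInj : ∀ (l1 l2 : List Char), l1.map Char.toNat = l2.map Char.toNat → l1 = l2 := by
  intro l1
  induction l1 with
  | nil => intro l2 h; cases l2 with | nil => rfl | cons x t => simp at h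
  | cons x t ih =>
    intro l2 h
    cases l2 with
    | nil => simp at h
    | cons y u =>
      simp only [List.map_cons, List.cons.injEq] at h
      rw [pvCharToNatInj x y h.1, ih u h.2]

theorem pvEncode_lt : ∀ (l : List Nat), (∀ d ∈ l, d < 128) → pvEncode l < 128 ^ l.length := by
  intro l
  induction l with
  | nil => intro _; simp [pvEncode]
  | cons d l ih =>
    intro h
    have hd := h d List.mem_cons_self
    have he := ih (fun x hx => h x (List.mem_cons_of_mem _ hx))
    simp only [pvEncode, List.length_cons, pow_succ]
    omega

theorem pvDigitsLen (n : Nat) (st : PvSt) (h : pvBounded n st) : (pvDigits st).length = n + 2 := by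
  obtain ⟨hlen, _, _, _⟩ := h
  simp [pvDigits]
  omega

theorem pvDigitsLt (n : Nat) (st : PvSt) (h : pvBounded n st) : ∀ d ∈ pvDigits st, d < 128 := by
  obtain ⟨_, h1, h2, h3⟩ := h
  intro d hd
  rcases List.mem_append.mp hd with hd | hd
  · obtain ⟨ch, hch, he⟩ := List.mem_map.mp hd
    have := h1 ch hch; omega
  · rcases List.mem_cons.mp hd with rfl | hd
    · norm_num
    · rcases List.mem_append.mp hd with hd | hd
      · obtain ⟨ch, hch, he⟩ := List.mem_map.mp hd
        have := h2 ch hch; omega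
      · rcases List.mem_cons.mp hd with rfl | hd
        · norm_num
        · obtain ⟨ch, hch, he⟩ := List.mem_map.mp hd
          have := h3 ch hch; omega

theorem pvEncode_inj : ∀ (l1 l2 : List Nat), l1.length = l2.length →
    (∀ d ∈ l1, d < 128) → (∀ d ∈ l2, d < 128) → pvEncode l1 = pvEncode l2 → l1 = l2 := by
  intro l1
  induction l1 with
  | nil => intro l2 hl _ _ _; cases l2 with | nil => rfl | cons x t => simp at hl
  | cons d t ih =>
    intro l2 hl h1 h2 he
    cases l2 with
    | nil => simp at hl
    | cons d' t' =>
      simp only [pvEncode] at he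
      have hd := h1 d List.mem_cons_self
      have hd' := h2 d' List.mem_cons_self
      have hde : d = d' ∧ pvEncode t = pvEncode t' := by omega
      rw [hde.1, ih t' (by simpa using hl) (fun x hx => h1 x (List.mem_cons_of_mem _ hx))
        (fun x hx => h2 x (List.mem_cons_of_mem _ hx)) hde.2]

theorem pvSplit127 : ∀ (l1 l2 : List Char) (r1 r2 : List Nat),
    (∀ ch ∈ l1, ch.toNat ≤ 126) → (∀ ch ∈ l2, ch.toNat ≤ 126) →
    l1.map Char.toNat ++ 127 :: r1 = l2.map Char.toNat ++ 127 :: r2 →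
    l1 = l2 ∧ r1 = r2 := by
  intro l1
  induction l1 with
  | nil =>
    intro l2 r1 r2 _ h2 he
    cases l2 with
    | nil => simpa using he
    | cons y u =>
      simp only [List.map_nil, List.nil_append, List.map_cons, List.cons_append,
        List.cons.injEq] at he
      have := h2 y List.mem_cons_self
      omega
  | cons x t ih =>
    intro l2 r1 r2 h1 h2 he
    cases l2 with
    | nil =>
      simp only [List.map_cons, List.cons_append, List.map_nil, List.nil_append,
        List.cons.injEq] at he
      have := h1 x List.mem_cons_self
      omega
    | cons y u =>
      simp only [List.map_cons, List.cons_append, List.cons.injEq] at he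
      obtain ⟨hte, hre⟩ := ih u r1 r2 (fun ch hch => h1 ch (List.mem_cons_of_mem _ hch))
        (fun ch hch => h2 ch (List.mem_cons_of_mem _ hch)) he.2
      exact ⟨by rw [pvCharToNatInj x y he.1, hte], hre⟩

theorem pvEnc_inj (n : Nat) (s t : PvSt) (hs : pvBounded n s) (ht : pvBounded n t)
    (h : pvEncode (pvDigits s) = pvEncode (pvDigits t)) : s = t := by
  have hdig : pvDigits s = pvDigits t :=
    pvEncode_inj _ _ (by rw [pvDigitsLen n s hs, pvDigitsLen n t ht])
      (pvDigitsLt n s hs) (pvDigitsLt n t ht) h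
  obtain ⟨_, hs1, hs2, hs3⟩ := hs
  obtain ⟨_, ht1, ht2, ht3⟩ := ht
  simp only [pvDigits] at hdig
  obtain ⟨h1, hrest⟩ := pvSplit127 s.1 t.1 _ _ hs1 ht1 hdig
  obtain ⟨h2, h3⟩ := pvSplit127 s.2.1 t.2.1 _ _ hs2 ht2 hrest
  have h3' := pvMapToNatInj _ _ h3
  obtain ⟨a, b, c⟩ := s; obtain ⟨a', b', c'⟩ := t
  simp only at h1 h2 h3' ⊢
  rw [h1, h2, h3']

theorem pvCardBound (n : Nat) : ∀ (l : List PvSt), l.Nodup → (∀ t ∈ l, pvBounded n t) →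
    l.length ≤ 128 ^ (n + 2) := by
  intro l hnd hb
  have hmap : (l.map (fun st => pvEncode (pvDigits st))).Nodup :=
    hnd.map_on (fun x hx y hy he => pvEnc_inj n x y (hb x hx) (hb y hy) he)
  have hsub : l.map (fun st => pvEncode (pvDigits st)) ⊆ List.range (128 ^ (n + 2)) := by
    intro x hx
    rcases List.mem_map.mp hx with ⟨st, hst, rfl⟩
    rw [List.mem_range]
    have := pvEncode_lt (pvDigits st) (pvDigitsLt n st (hb st hst))
    rwa [pvDigitsLen n st (hb st hst)] at this
  have := (hmap.subperm hsub).length_le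
  simpa using this

-- cardinality bounds in terms of hash-container sizes
theorem pvSizeBoundMap (n : Nat) (dist : Std.HashMap PvSt Int)
    (hb : ∀ t, dist.contains t = true → pvBounded n t) : dist.size ≤ 128 ^ (n + 2) := by
  have hnd : dist.keys.Nodup := by
    have := Std.HashMap.distinct_keys (m := dist)
    exact this.imp (fun {a b} hab he => by subst he; simp at hab)
  have hsb : ∀ t ∈ dist.keys, pvBounded n t := fun t ht =>
    hb t (Std.HashMap.mem_iff_contains.mp (Std.HashMap.mem_keys.mp ht))
  have := pvCardBound n dist.keys hnd hsb
  rwa [Std.HashMap.length_keys] at this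

theorem pvSizeBoundSet (n : Nat) (vis : Std.HashSet PvSt)
    (hb : ∀ t, vis.contains t = true → pvBounded n t) : vis.size ≤ 128 ^ (n + 2) := by
  have hnd : vis.toList.Nodup := by
    have := Std.HashSet.distinct_toList (m := vis)
    exact this.imp (fun {a b} hab he => by subst he; simp at hab)
  have hsb : ∀ t ∈ vis.toList, pvBounded n t := fun t ht =>
    hb t (Std.HashSet.mem_iff_contains.mp (Std.HashSet.mem_toList.mp ht))
  have := pvCardBound n vis.toList hnd hsb
  rwa [Std.HashSet.length_toList] at this

theorem pvAdequacyA (n : Nat) : ∀ (f : Nat) (dist : Std.HashMap PvSt Int) (q : List PvSt),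
    (∀ t, dist.contains t = true → pvBounded n t) → (∀ s ∈ q, dist.contains s = true) →
    128 ^ (n + 2) + q.length + 1 ≤ dist.size + f →
    bfsLoop f dist q ≠ none := by
  intro f
  induction f with
  | zero =>
    intro dist q hb _ hcard
    have := pvSizeBoundMap n dist hb
    omega
  | succ f ih =>
    intro dist q hb hq hcard
    match q with
    | [] => simp [bfsLoop]
    | (a, b, c) :: qt =>
      by_cases hend : endingSequence a b c = true
      · simp [bfsLoop, hend]
      · have hend' : endingSequence a b c = false := by simpa using hend
        simp only [bfsLoop, hend', Bool.false_eq_true, if_false]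
        obtain ⟨dist1, new1, hA1, _, hsz1, hct1, _, _, hmem1⟩ :=
          pvAddSim (dist.getD (a, b, c) 0) (pvMoves (a, b, c)) dist
        rw [show pvStepA (dist.getD (a, b, c) 0) (dist, qt) (a, b, c) = (dist1, qt ++ new1) from by
          rw [pvStepA_eq_foldl]; exact hA1 qt]
        have hsmem : dist.contains (a, b, c) = true := hq _ List.mem_cons_self
        apply ih dist1 (qt ++ new1)
        · intro t ht
          rcases (hct1 t).mp ht with h | h
          · exact hb t h
          · exact pvMovesBounded n (a, b, c) t (hb _ hsmem) (hmem1 t h)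
        · intro s hs
          rcases List.mem_append.mp hs with h | h
          · exact (hct1 s).mpr (Or.inl (hq s (List.mem_cons_of_mem _ h)))
          · exact (hct1 s).mpr (Or.inr h)
        · simp only [List.length_append, hsz1]
          simp only [List.length_cons] at hcard
          omega

theorem pvAdequacyB (P : PvSt → Bool) (n : Nat) :
    ∀ (f : Nat) (vis : Std.HashSet PvSt) (F : List PvSt) (d : Int),
    (∀ t, vis.contains t = true → pvBounded n t) → (∀ s ∈ F, vis.contains s = true) →
    128 ^ (n + 2) + 2 ≤ vis.size + f →
    pvLevelLoop P f vis F d ≠ none := by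
  intro f
  induction f with
  | zero =>
    intro vis F d hb _ hcard
    have := pvSizeBoundSet n vis hb
    omega
  | succ f ih =>
    intro vis F d hb hFv hcard
    by_cases hemp : F.isEmpty = true
    · simp [pvLevelLoop, hemp]
    · by_cases hany : F.any P = true
      · simp [pvLevelLoop, hemp, hany]
      · have hany' : F.any P = false := by simpa using hany
        simp only [pvLevelLoop, hemp, hany', Bool.false_eq_true, if_false]
        obtain ⟨vis2, new, he2, hct2, hsz2, hmem2⟩ := pvFrontBShape F vis []
        rw [he2, List.nil_append]
        have hcardv := pvSizeBoundSet n vis hb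
        have hb2 : ∀ t, vis2.contains t = true → pvBounded n t := by
          intro t ht
          rcases (hct2 t).mp ht with h | h
          · exact hb t h
          · obtain ⟨⟨s, hsF, hsm⟩, _⟩ := (hmem2 t).mp h
            exact pvMovesBounded n s t (hb s (hFv s hsF)) hsm
        match hne : new with
        | [] =>
          have hf1 : 1 ≤ f := by omega
          match f, hf1 with
          | f' + 1, _ => simp [pvLevelLoop]
        | t0 :: newt =>
          apply ih vis2 (t0 :: newt) (d + 1) hb2
          · intro s hs
            exact (hct2 s).mpr (Or.inr hs)
          · rw [hsz2]
            simp only [List.length_cons]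
            omega

-- ===== the mathematical layer: balls of the move relation, and what a level loop computes =====

-- characterization of membership in pvMoves
theorem mem_pvMoves (a b c : List Char) (t : PvSt) :
    t ∈ pvMoves (a, b, c) ↔
      (∃ ys x, a = ys ++ [x] ∧ (t = (ys, b ++ [x], c) ∨ t = (ys, b, c ++ [x]))) ∨
      (∃ ys x, b = ys ++ [x] ∧ (t = (a ++ [x], ys, c) ∨ t = (a, ys, c ++ [x]))) ∨
      (∃ ys x, c = ys ++ [x] ∧ (t = (a ++ [x], b, ys) ∨ t = (a, b ++ [x], ys))) := by
  simp only [pvMoves]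
  constructor
  · intro ht
    rcases List.mem_append.mp ht with hab | h3
    · rcases List.mem_append.mp hab with h1 | h2
      · split at h1
        · rename_i hcond
          have ha : a ≠ [] := by simpa using hcond
          simp only [List.mem_cons, List.not_mem_nil, or_false] at h1
          rw [PySem.List.slice_to_neg_one, PySem.List.pyGetD_neg_one a 'A' ha] at h1
          exact Or.inl ⟨a.dropLast, a.getLast ha, (List.dropLast_append_getLast ha).symm, h1⟩
        · simp at h1
      · split at h2
        · rename_i hcond
          have hb : b ≠ [] := by simpa using hcond
          simp only [List.mem_cons, List.not_mem_nil, or_false] at h2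
          rw [PySem.List.slice_to_neg_one, PySem.List.pyGetD_neg_one b 'A' hb] at h2
          exact Or.inr (Or.inl ⟨b.dropLast, b.getLast hb, (List.dropLast_append_getLast hb).symm, h2⟩)
        · simp at h2
    · split at h3
      · rename_i hcond
        have hc : c ≠ [] := by simpa using hcond
        simp only [List.mem_cons, List.not_mem_nil, or_false] at h3
        rw [PySem.List.slice_to_neg_one, PySem.List.pyGetD_neg_one c 'A' hc] at h3
        exact Or.inr (Or.inr ⟨c.dropLast, c.getLast hc, (List.dropLast_append_getLast hc).symm, h3⟩)
      · simp at h3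
  · intro h
    rcases h with ⟨ys, x, ha, ht⟩ | ⟨ys, x, hb, ht⟩ | ⟨ys, x, hc, ht⟩
    · subst ha
      have hne : ys ++ [x] ≠ ([] : List Char) := by simp
      apply List.mem_append.mpr; left; apply List.mem_append.mpr; left
      rw [if_pos (by simpa using hne), PySem.List.slice_to_neg_one,
        PySem.List.pyGetD_neg_one (ys ++ [x]) 'A' hne, List.dropLast_concat, List.getLast_concat]
      simpa using ht
    · subst hb
      have hne : ys ++ [x] ≠ ([] : List Char) := by simp
      apply List.mem_append.mpr; left; apply List.mem_append.mpr; right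
      rw [if_pos (by simpa using hne), PySem.List.slice_to_neg_one,
        PySem.List.pyGetD_neg_one (ys ++ [x]) 'A' hne, List.dropLast_concat, List.getLast_concat]
      simpa using ht
    · subst hc
      have hne : ys ++ [x] ≠ ([] : List Char) := by simp
      apply List.mem_append.mpr; right
      rw [if_pos (by simpa using hne), PySem.List.slice_to_neg_one,
        PySem.List.pyGetD_neg_one (ys ++ [x]) 'A' hne, List.dropLast_concat, List.getLast_concat]
      simpa using ht

-- the move set is its own reverse
theorem pvMoves_symm {s t : PvSt} (h : t ∈ pvMoves s) : s ∈ pvMoves t := by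
  obtain ⟨a, b, c⟩ := s
  rw [mem_pvMoves] at h
  rcases h with ⟨ys, x, ha, ht | ht⟩ | ⟨ys, x, hb, ht | ht⟩ | ⟨ys, x, hc, ht | ht⟩ <;> subst ht
  · rw [mem_pvMoves]; exact Or.inr (Or.inl ⟨b, x, rfl, Or.inl (by rw [ha])⟩)
  · rw [mem_pvMoves]; exact Or.inr (Or.inr ⟨c, x, rfl, Or.inl (by rw [ha])⟩)
  · rw [mem_pvMoves]; exact Or.inl ⟨a, x, rfl, Or.inl (by rw [hb])⟩
  · rw [mem_pvMoves]; exact Or.inr (Or.inr ⟨c, x, rfl, Or.inr (by rw [hb])⟩)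
  · rw [mem_pvMoves]; exact Or.inl ⟨a, x, rfl, Or.inr (by rw [hc])⟩
  · rw [mem_pvMoves]; exact Or.inr (Or.inl ⟨b, x, rfl, Or.inr (by rw [hc])⟩)

-- ball of radius n around s0 in the move graph
def pvR (s0 : PvSt) : Nat → PvSt → Prop
  | 0 => fun t => t = s0
  | n + 1 => fun t => pvR s0 n t ∨ ∃ u, pvR s0 n u ∧ t ∈ pvMoves u

-- the previous ball (empty at radius 0)
def pvPrev (s0 : PvSt) : Nat → PvSt → Prop
  | 0 => fun _ => False
  | n + 1 => pvR s0 n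

theorem pvR_mono (s0 : PvSt) (n : Nat) (t : PvSt) (h : pvR s0 n t) : pvR s0 (n + 1) t := Or.inl h

theorem pvR_self (s0 : PvSt) : ∀ n, pvR s0 n s0 := by
  intro n
  induction n with
  | zero => rfl
  | succ n ih => exact Or.inl ih

theorem pvR_stab (s0 : PvSt) (j : Nat) (h : ∀ t, pvR s0 (j + 1) t → pvR s0 j t) :
    ∀ n t, pvR s0 n t → pvR s0 j t := by
  intro n
  induction n with
  | zero => intro t ht; rw [show t = s0 from ht]; exact pvR_self s0 j
  | succ n ih =>
    intro t ht
    rcases ht with ht | ⟨u, hu, hm⟩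
    · exact ih t ht
    · exact h t (Or.inr ⟨u, ih u hu, hm⟩)

theorem pvR_edge_prepend {t t' : PvSt} (h : t' ∈ pvMoves t) :
    ∀ n s, pvR t' n s → pvR t (n + 1) s := by
  intro n
  induction n with
  | zero => intro s hs; rw [show s = t' from hs]; exact Or.inr ⟨t, rfl, h⟩
  | succ n ih =>
    intro s hs
    rcases hs with hs | ⟨u, hu, hm⟩
    · exact pvR_mono _ _ _ (ih s hs)
    · exact Or.inr ⟨u, ih u hu, hm⟩

theorem pvR_symm : ∀ (n : Nat) (s t : PvSt), pvR s n t → pvR t n s := by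
  intro n
  induction n with
  | zero => intro s t h; exact (show t = s from h) ▸ rfl
  | succ n ih =>
    intro s t h
    rcases h with h | ⟨u, hu, hm⟩
    · exact pvR_mono _ _ _ (ih s t h)
    · exact pvR_edge_prepend (pvMoves_symm hm) n s (ih s u hu)

-- the multiset of all letters of a state: invariant under moves
def pvMs (st : PvSt) : Multiset Char :=
  (st.1 : Multiset Char) + (st.2.1 : Multiset Char) + (st.2.2 : Multiset Char)

theorem pvMs_moves {s t : PvSt} (h : t ∈ pvMoves s) : pvMs t = pvMs s := by
  obtain ⟨a, b, c⟩ := s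
  rw [mem_pvMoves] at h
  rcases h with ⟨ys, x, hx, ht | ht⟩ | ⟨ys, x, hx, ht | ht⟩ | ⟨ys, x, hx, ht | ht⟩ <;>
    subst ht <;> subst hx <;>
    simp only [pvMs, ← Multiset.coe_add] <;>
    exact Multiset.coe_eq_coe.mpr (by
      rw [List.perm_iff_count]
      intro y
      simp only [List.count_append]
      omega)

theorem pvR_ms (s0 : PvSt) : ∀ n t, pvR s0 n t → pvMs t = pvMs s0 := by
  intro n
  induction n with
  | zero => intro t ht; rw [show t = s0 from ht]
  | succ n ih =>
    intro t ht
    rcases ht with ht | ⟨u, hu, hm⟩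
    · exact ih t ht
    · rw [pvMs_moves hm, ih u hu]

-- a goal state (pvOk) with letter multiset L is exactly the replicate triple of L's counts
theorem pvOk_char (t : PvSt) (L : List Char) (hok : pvOk t = true)
    (hms : pvMs t = (L : Multiset Char)) :
    t = (List.replicate (L.count 'A') 'A', List.replicate (L.count 'B') 'B',
         List.replicate (L.count 'C') 'C') := by
  obtain ⟨a, b, c⟩ := t
  simp only [pvOk, Bool.and_eq_true, List.all_eq_true, beq_iff_eq] at hok
  obtain ⟨⟨hA, hB⟩, hC⟩ := hok
  have ea : a = List.replicate a.length 'A' := List.eq_replicate_of_mem hA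
  have eb : b = List.replicate b.length 'B' := List.eq_replicate_of_mem hB
  have ec : c = List.replicate c.length 'C' := List.eq_replicate_of_mem hC
  have hcount : ∀ x : Char, List.count x a + (List.count x b + List.count x c) = List.count x L := by
    intro x
    have := congrArg (Multiset.count x) hms
    simp only [pvMs, Multiset.count_add, Multiset.coe_count] at this
    omega
  have hcnt : ∀ (l : List Char) (n : Nat) (x y : Char), l = List.replicate n y →
      List.count x l = if x = y then n else 0 := by
    intro l n x y hl
    subst hl
    rcases eq_or_ne x y with rfl | hne
    · simp [List.count_replicate]
    · simp [List.count_replicate, hne, Ne.symm hne]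
  have hca : a.length = L.count 'A' := by
    have h := hcount 'A'
    rw [hcnt a _ 'A' 'A' ea, hcnt b _ 'A' 'B' eb, hcnt c _ 'A' 'C' ec] at h
    simpa using h
  have hcb : b.length = L.count 'B' := by
    have h := hcount 'B'
    rw [hcnt a _ 'B' 'A' ea, hcnt b _ 'B' 'B' eb, hcnt c _ 'B' 'C' ec] at h
    simpa using h
  have hcc : c.length = L.count 'C' := by
    have h := hcount 'C'
    rw [hcnt a _ 'C' 'A' ea, hcnt b _ 'C' 'B' eb, hcnt c _ 'C' 'C' ec] at h
    simpa using h
  simp only [Prod.mk.injEq]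
  refine ⟨?_, ?_, ?_⟩
  · rw [← hca]; exact ea
  · rw [← hcb]; exact eb
  · rw [← hcc]; exact ec

theorem pvOk_goal (nA nB nC : Nat) :
    pvOk (List.replicate nA 'A', List.replicate nB 'B', List.replicate nC 'C') = true := by
  simp [pvOk, List.all_eq_true, List.eq_of_mem_replicate]

-- counts of A,B,C exhaust a list over the alphabet {A,B,C}
theorem pvCountABC (l : List Char) (h : ∀ ch ∈ l, ch = 'A' ∨ ch = 'B' ∨ ch = 'C') :
    l.count 'A' + l.count 'B' + l.count 'C' = l.length := by
  induction l with
  | nil => simp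
  | cons x t ih =>
    have hx := h x List.mem_cons_self
    have ht := ih (fun ch hch => h ch (List.mem_cons_of_mem _ hch))
    rcases hx with rfl | rfl | rfl <;>
      simp [List.count_cons] <;> omega

-- what a level loop computes, as a property of the returned value
def pvSpecLoop (s0 : PvSt) (P : PvSt → Prop) : Option Int → Prop
  | some v => ∃ k : Nat, v = (k : Int) ∧ (∃ t, pvR s0 k t ∧ P t) ∧
      ∀ j, j < k → ¬ ∃ t, pvR s0 j t ∧ P t
  | none => ∀ (n : Nat) (t : PvSt), pvR s0 n t → ¬ P t

theorem pvSpecLoop_uniq (s0 : PvSt) (P : PvSt → Prop) (r1 r2 : Option Int)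
    (h1 : pvSpecLoop s0 P r1) (h2 : pvSpecLoop s0 P r2) : r1 = r2 := by
  match r1, r2 with
  | none, none => rfl
  | none, some v =>
    obtain ⟨k, _, ⟨t, ht, hp⟩, _⟩ := h2
    exact absurd hp (h1 k t ht)
  | some v, none =>
    obtain ⟨k, _, ⟨t, ht, hp⟩, _⟩ := h1
    exact absurd hp (h2 k t ht)
  | some v1, some v2 =>
    obtain ⟨k1, rfl, he1, hm1⟩ := h1
    obtain ⟨k2, rfl, he2, hm2⟩ := h2
    rcases Nat.lt_trichotomy k1 k2 with h | h | h
    · exact absurd he1 (hm2 k1 h)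
    · rw [h]
    · exact absurd he2 (hm1 k2 h)

theorem pvSpecLoop_congr (s0 s1 : PvSt) (P Q : PvSt → Prop)
    (h : ∀ k : Nat, (∃ t, pvR s0 k t ∧ P t) ↔ (∃ t, pvR s1 k t ∧ Q t)) :
    ∀ r, pvSpecLoop s0 P r → pvSpecLoop s1 Q r := by
  intro r hr
  match r with
  | some v =>
    obtain ⟨k, rfl, he, hm⟩ := hr
    exact ⟨k, rfl, (h k).mp he, fun j hj hc => hm j hj ((h j).mpr hc)⟩
  | none =>
    intro n t ht hq
    obtain ⟨t', ht', hp'⟩ := (h n).mpr ⟨t, ht, hq⟩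
    exact hr n t' ht' hp'

theorem pvPrev_step {s0 : PvSt} {k : Nat} {u t : PvSt} (h : pvPrev s0 k u)
    (hm : t ∈ pvMoves u) : pvR s0 k t := by
  cases k with
  | zero => exact absurd h (fun hh => hh)
  | succ j => exact Or.inr ⟨u, h, hm⟩

theorem pvPrev_lt {s0 : PvSt} {k : Nat} {t : PvSt} (h : pvPrev s0 k t) :
    ∃ j, j < k ∧ pvR s0 j t := by
  cases k with
  | zero => exact absurd h (fun hh => hh)
  | succ j => exact ⟨j, Nat.lt_succ_self j, h⟩

-- the level loop, started with correct ball/sphere data at level k, satisfies pvSpecLoop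
theorem pvLoopChar (P : PvSt → Bool) (s0 : PvSt) :
    ∀ (f : Nat) (k : Nat) (vis : Std.HashSet PvSt) (F : List PvSt) (r : Option Int),
    (∀ t, vis.contains t = true ↔ pvR s0 k t) →
    (∀ t, t ∈ F ↔ (pvR s0 k t ∧ ¬ pvPrev s0 k t)) →
    (∀ j, j < k → ∀ t, pvR s0 j t → ¬ P t = true) →
    pvLevelLoop P f vis F (k : Int) = some r →
    pvSpecLoop s0 (fun t => P t = true) r := by
  intro f
  induction f with
  | zero => intro k vis F r _ _ _ h; simp [pvLevelLoop] at h
  | succ f ih =>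
    intro k vis F r hvis hF hNo h
    simp only [pvLevelLoop] at h
    by_cases hemp : F.isEmpty = true
    · rw [if_pos hemp] at h
      obtain rfl : (none : Option Int) = r := Option.some_inj.mp h
      obtain rfl := List.isEmpty_iff.mp hemp
      match k with
      | 0 =>
        exact absurd ((hF s0).mpr ⟨rfl, fun hh => hh⟩) (List.not_mem_nil)
      | j + 1 =>
        have hclosed : ∀ t, pvR s0 (j + 1) t → pvR s0 j t := by
          intro t ht
          by_contra hc
          exact absurd ((hF t).mpr ⟨ht, hc⟩) (List.not_mem_nil)
        intro n t ht
        exact hNo j (Nat.lt_succ_self j) t (pvR_stab s0 j hclosed n t ht)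
    · rw [if_neg hemp] at h
      by_cases hany : F.any P = true
      · rw [if_pos hany] at h
        obtain rfl : (some (k : Int) : Option Int) = r := Option.some_inj.mp h
        obtain ⟨t, htF, hPt⟩ := List.any_eq_true.mp hany
        exact ⟨k, rfl, ⟨t, ((hF t).mp htF).1, hPt⟩,
          fun j hj ⟨t', ht', hp'⟩ => hNo j hj t' ht' hp'⟩
      · rw [if_neg hany] at h
        have hFP : ∀ t ∈ F, ¬ P t = true := fun t htF hPt =>
          hany (List.any_eq_true.mpr ⟨t, htF, hPt⟩)
        obtain ⟨vis2, new, he2, hct2, _, hmem2⟩ := pvFrontBShape F vis []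
        rw [he2] at h
        simp only [List.nil_append] at h
        have hcast : ((k : Int) + 1) = ((k + 1 : Nat) : Int) := by push_cast; ring
        rw [hcast] at h
        -- new ball
        have hvis2 : ∀ t, vis2.contains t = true ↔ pvR s0 (k + 1) t := by
          intro t
          rw [hct2 t]
          constructor
          · rintro (hv | hn)
            · exact pvR_mono _ _ _ ((hvis t).mp hv)
            · obtain ⟨⟨s, hsF, hm⟩, _⟩ := (hmem2 t).mp hn
              exact Or.inr ⟨s, ((hF s).mp hsF).1, hm⟩
          · rintro (hk | ⟨u, hu, hm⟩)
            · exact Or.inl ((hvis t).mpr hk)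
            · by_cases hvt : vis.contains t = true
              · exact Or.inl hvt
              · right
                apply (hmem2 t).mpr
                refine ⟨?_, by simpa using hvt⟩
                by_cases hPrev : pvPrev s0 k u
                · exact absurd ((hvis t).mpr (pvPrev_step hPrev hm)) (by simp [hvt])
                · exact ⟨u, (hF u).mpr ⟨hu, hPrev⟩, hm⟩
        -- new sphere
        have hF2 : ∀ t, t ∈ new ↔ (pvR s0 (k + 1) t ∧ ¬ pvPrev s0 (k + 1) t) := by
          intro t
          rw [hmem2 t]
          constructor
          · rintro ⟨⟨s, hsF, hm⟩, hv⟩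
            refine ⟨Or.inr ⟨s, ((hF s).mp hsF).1, hm⟩, ?_⟩
            intro hk
            exact absurd ((hvis t).mpr hk) (by simp [hv])
          · rintro ⟨hR, hP⟩
            have hv : vis.contains t = false := by
              rw [Bool.eq_false_iff]
              intro hc
              exact hP ((hvis t).mp hc)
            refine ⟨?_, hv⟩
            rcases hR with hk | ⟨u, hu, hm⟩
            · exact absurd hk hP
            · by_cases hPrev : pvPrev s0 k u
              · exact absurd (pvPrev_step hPrev hm) hP
              · exact ⟨u, (hF u).mpr ⟨hu, hPrev⟩, hm⟩
        -- no earlier goal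
        have hNo2 : ∀ j, j < k + 1 → ∀ t, pvR s0 j t → ¬ P t = true := by
          intro j hj t ht
          rcases Nat.lt_or_ge j k with hlt | hge
          · exact hNo j hlt t ht
          · have hjk : j = k := by omega
            rw [hjk] at ht
            by_cases hPrev : pvPrev s0 k t
            · obtain ⟨i, hik, hRi⟩ := pvPrev_lt hPrev
              exact hNo i hik t hRi
            · exact hFP t ((hF t).mpr ⟨ht, hPrev⟩)
        exact ih (k + 1) vis2 new r hvis2 hF2 hNo2 h

-- ===== VERDICT (by name: the statement is the Claim_ definition above) =====
theorem bfs_spec : Claim_equal_bfs := by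
  unfold Claim_equal_bfs Spec_bfs
  intro sa sb sc hdom
  have hchars : ∀ (s : String), pvDomStr s = true → ∀ ch ∈ s.toList, ch.toNat ≤ 126 := by
    intro s hs ch hch
    have := List.all_eq_true.mp hs ch hch
    simp [pvDomChar] at this
    omega
  have hdd : pvDomStr sa = true ∧ pvDomStr sb = true ∧ pvDomStr sc = true := by
    unfold Dom_bfs at hdom
    simpa [Bool.and_eq_true, and_assoc] using hdom
  simp only [bfs, bfs_alt]
  set s0 : PvSt := (sa.toList, sb.toList, sc.toList) with hs0def
  set L : List Char := sa.toList ++ sb.toList ++ sc.toList with hLdef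
  set N := sa.toList.length + sb.toList.length + sc.toList.length with hNdef
  have hbound0 : pvBounded N s0 := ⟨rfl, hchars sa hdd.1, hchars sb hdd.2.1, hchars sc hdd.2.2⟩
  have hmsL : pvMs s0 = (L : Multiset Char) := by
    simp [pvMs, hs0def, hLdef, ← Multiset.coe_add, add_assoc]
  set dist0 : Std.HashMap PvSt Int := (∅ : Std.HashMap PvSt Int).insert s0 0 with hd0
  set vis0 : Std.HashSet PvSt := (∅ : Std.HashSet PvSt).insert s0 with hv0
  have hcont0 : ∀ t, dist0.contains t = true → t = s0 := by
    intro t ht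
    rw [hd0, Std.HashMap.contains_insert, Std.HashMap.contains_empty, Bool.or_false,
      beq_iff_eq] at ht
    exact ht.symm
  have hfuel : pvFuel sa sb sc = 128 ^ (N + 2) + 2 := rfl
  have hsz0 : dist0.size = 1 := by
    rw [hd0, Std.HashMap.size_insert, if_neg (Std.HashMap.not_mem_empty)]
    rw [Std.HashMap.size_empty]
  have hvsz0 : vis0.size = 1 := by
    rw [hv0, Std.HashSet.size_insert, if_neg (Std.HashSet.not_mem_empty)]
    rw [Std.HashSet.size_empty]
  -- A's queue loop terminates
  have hAne : bfsLoop (pvFuel sa sb sc) dist0 [s0] ≠ none := by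
    apply pvAdequacyA N (pvFuel sa sb sc) dist0 [s0]
    · intro t ht; rw [hcont0 t ht]; exact hbound0
    · intro s hs
      rw [List.mem_singleton] at hs; subst hs
      rw [hd0, Std.HashMap.contains_insert, beq_self_eq_true]; rfl
    · rw [hfuel, hsz0]; simp only [List.length_cons, List.length_nil]; omega
  -- the forward pvOk level loop terminates (a proof-internal run)
  have hLne : pvLevelLoop pvOk (pvFuel sa sb sc) vis0 [s0] 0 ≠ none := by
    apply pvAdequacyB pvOk N (pvFuel sa sb sc) vis0 [s0] 0
    · intro t ht
      rw [hv0, Std.HashSet.contains_insert, Std.HashSet.contains_empty, Bool.or_false,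
        beq_iff_eq] at ht
      rw [← ht]; exact hbound0
    · intro s hs
      rw [List.mem_singleton] at hs; subst hs
      rw [hv0, Std.HashSet.contains_insert, beq_self_eq_true]; rfl
    · rw [hfuel, hvsz0]; omega
  cases hA : bfsLoop (pvFuel sa sb sc) dist0 [s0] with
  | none => exact absurd hA hAne
  | some rA =>
    cases hL : pvLevelLoop pvOk (pvFuel sa sb sc) vis0 [s0] 0 with
    | none => exact absurd hL hLne
    | some rL =>
      -- A's loop returns what the forward level loop returns
      have hF0 : ∀ s ∈ [s0], dist0[s]? = some (0 : Int) := by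
        intro s hs; rw [List.mem_singleton] at hs; subst hs
        rw [hd0]; exact Std.HashMap.getElem?_insert_self
      have hrel0 : ∀ t, vis0.contains t = dist0.contains t := by
        intro t
        rw [hv0, hd0, Std.HashSet.contains_insert, Std.HashMap.contains_insert]
        simp
      obtain ⟨fA, hfA⟩ := pvMainSim (pvFuel sa sb sc) dist0 [s0] 0 rL vis0 hF0 hrel0 hL
      have hArL : rA = rL := bfsLoop_uniq _ _ _ _ _ _ hA hfA
      -- the forward level loop satisfies the forward spec
      have hvisInit : ∀ t, vis0.contains t = true ↔ pvR s0 0 t := by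
        intro t
        rw [hv0, Std.HashSet.contains_insert, Std.HashSet.contains_empty, Bool.or_false,
          beq_iff_eq]
        exact ⟨fun h => h.symm, fun h => h.symm⟩
      have hFInit : ∀ t, t ∈ [s0] ↔ (pvR s0 0 t ∧ ¬ pvPrev s0 0 t) := by
        intro t
        rw [List.mem_singleton]
        exact ⟨fun h => ⟨h, fun hh => hh⟩, fun ⟨h, _⟩ => h⟩
      have hL' : pvLevelLoop pvOk (pvFuel sa sb sc) vis0 [s0] ((0 : Nat) : Int) = some rL := by
        exact_mod_cast hL
      have hSpecL : pvSpecLoop s0 (fun t => pvOk t = true) rL :=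
        pvLoopChar pvOk s0 (pvFuel sa sb sc) 0 vis0 [s0] rL hvisInit hFInit
          (fun j hj => absurd hj (Nat.not_lt_zero j)) hL'
      by_cases hpure : L.any (fun ch => !(['A', 'B', 'C'].contains ch)) = true
      · -- impure letters: no reachable goal, both sides return none
        rw [if_pos hpure]
        obtain ⟨x, hxL, hxP⟩ := List.any_eq_true.mp hpure
        have hxABC : x ≠ 'A' ∧ x ≠ 'B' ∧ x ≠ 'C' := by
          simp only [Bool.not_eq_true', List.contains_eq_mem, decide_eq_false_iff_not] at hxP
          simp only [List.mem_cons, List.not_mem_nil, or_false] at hxP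
          tauto
        have hnone : pvSpecLoop s0 (fun t => pvOk t = true) none := by
          intro n t ht hok
          have hms : pvMs t = (L : Multiset Char) := by rw [pvR_ms s0 n t ht, hmsL]
          have := pvOk_char t L hok hms
          subst this
          have hcx := congrArg (Multiset.count x) hms
          rw [Multiset.coe_count] at hcx
          have hx1 : Multiset.count x (pvMs (List.replicate (L.count 'A') 'A',
              List.replicate (L.count 'B') 'B', List.replicate (L.count 'C') 'C')) = 0 := by
            simp [pvMs, Multiset.count_add, Multiset.coe_count, List.count_replicate,
              hxABC.1, hxABC.2.1, hxABC.2.2]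
          rw [hx1] at hcx
          have : 0 < L.count x := List.count_pos_iff.mpr hxL
          omega
        have : rL = none := pvSpecLoop_uniq s0 _ rL none hSpecL hnone
        rw [hArL, this]
      · -- pure letters: backward level loop from the goal
        rw [if_neg hpure]
        have hpure' : ∀ ch ∈ L, ch = 'A' ∨ ch = 'B' ∨ ch = 'C' := by
          intro ch hch
          by_contra hc
          push_neg at hc
          apply hpure
          refine List.any_eq_true.mpr ⟨ch, hch, ?_⟩
          simp [List.contains_eq_mem, hc.1, hc.2.1, hc.2.2]
        set g : PvSt := (List.replicate (L.count 'A') 'A', List.replicate (L.count 'B') 'B',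
            List.replicate (L.count 'C') 'C') with hgdef
        have hgbound : pvBounded N g := by
          refine ⟨?_, ?_, ?_, ?_⟩
          · simp only [hgdef, List.length_replicate]
            have := pvCountABC L hpure'
            simp only [hLdef, List.length_append] at this
            omega
          all_goals
            intro ch hch
            have := List.eq_of_mem_replicate hch
            subst this
            decide
        have hgvsz : ((∅ : Std.HashSet PvSt).insert g).size = 1 := by
          rw [Std.HashSet.size_insert, if_neg (Std.HashSet.not_mem_empty)]
          rw [Std.HashSet.size_empty]
        have hBne : pvLevelLoop (fun t => t == s0) (pvFuel sa sb sc)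
            ((∅ : Std.HashSet PvSt).insert g) [g] 0 ≠ none := by
          apply pvAdequacyB (fun t => t == s0) N
          · intro t ht
            rw [Std.HashSet.contains_insert, Std.HashSet.contains_empty, Bool.or_false,
              beq_iff_eq] at ht
            rw [← ht]; exact hgbound
          · intro s hs
            rw [List.mem_singleton] at hs; subst hs
            rw [Std.HashSet.contains_insert, beq_self_eq_true]; rfl
          · rw [hfuel, hgvsz]; omega
        cases hB : pvLevelLoop (fun t => t == s0) (pvFuel sa sb sc)
            ((∅ : Std.HashSet PvSt).insert g) [g] 0 with
        | none => exact absurd hB hBne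
        | some rB =>
          have hvisInitG : ∀ t, ((∅ : Std.HashSet PvSt).insert g).contains t = true ↔
              pvR g 0 t := by
            intro t
            rw [Std.HashSet.contains_insert, Std.HashSet.contains_empty, Bool.or_false,
              beq_iff_eq]
            exact ⟨fun h => h.symm, fun h => h.symm⟩
          have hFInitG : ∀ t, t ∈ [g] ↔ (pvR g 0 t ∧ ¬ pvPrev g 0 t) := by
            intro t
            rw [List.mem_singleton]
            exact ⟨fun h => ⟨h, fun hh => hh⟩, fun ⟨h, _⟩ => h⟩
          have hB' : pvLevelLoop (fun t => t == s0) (pvFuel sa sb sc)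
              ((∅ : Std.HashSet PvSt).insert g) [g] ((0 : Nat) : Int) = some rB := by
            exact_mod_cast hB
          have hSpecB : pvSpecLoop g (fun t => (t == s0) = true) rB :=
            pvLoopChar (fun t => t == s0) g (pvFuel sa sb sc) 0 _ [g] rB hvisInitG hFInitG
              (fun j hj => absurd hj (Nat.not_lt_zero j)) hB'
          -- transfer between forward and backward specs
          have hIff : ∀ k : Nat, (∃ t, pvR g k t ∧ (t == s0) = true) ↔
              (∃ t, pvR s0 k t ∧ pvOk t = true) := by
            intro k
            constructor
            · rintro ⟨t, ht, hts⟩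
              rw [beq_iff_eq] at hts
              subst hts
              refine ⟨g, pvR_symm k g _ ht, ?_⟩
              rw [hgdef]; exact pvOk_goal _ _ _
            · rintro ⟨t, ht, hok⟩
              have hms : pvMs t = (L : Multiset Char) := by rw [pvR_ms s0 k t ht, hmsL]
              have hgt : t = g := by rw [hgdef]; exact pvOk_char t L hok hms
              subst hgt
              exact ⟨s0, pvR_symm k s0 _ ht, beq_self_eq_true s0⟩
          have hSpecB' : pvSpecLoop s0 (fun t => pvOk t = true) rB :=
            pvSpecLoop_congr g s0 _ _ hIff rB hSpecB
          have : rL = rB := pvSpecLoop_uniq s0 _ rL rB hSpecL hSpecB'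
          rw [hArL, this]
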